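-- pv_equiv track=rewrite | github.com/sinsomi/Coding-Test | 프로그래머스/인강/히샤드 수.py | solution
-- ===== SOURCE A (Python) =====
-- def solution(arr):
--     arr_sum=0
--     str_arr=str(arr)
--     for i in range(len(str_arr)):
--         arr_sum+=int(str_arr[i])
--     if arr%arr_sum!=0:
--         return False
--     return True
-- ===== SOURCE B (Python) =====
-- def solution(arr):
--     total = 0
--     n = arr
--     while n > 0:
--         total += n % 10
--         n //= 10
--     return arr % total == 0
-- ===== Notes on version B (the rewrite author's own statement) =====
-- stated objective: idiomatic
-- what changed: B extracts digits arithmetically with a while loop over n % 10 / n //= 10 instead of converting the number to a string and re-parsing each character with int(), then tests divisibility once.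
import Mathlib
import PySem

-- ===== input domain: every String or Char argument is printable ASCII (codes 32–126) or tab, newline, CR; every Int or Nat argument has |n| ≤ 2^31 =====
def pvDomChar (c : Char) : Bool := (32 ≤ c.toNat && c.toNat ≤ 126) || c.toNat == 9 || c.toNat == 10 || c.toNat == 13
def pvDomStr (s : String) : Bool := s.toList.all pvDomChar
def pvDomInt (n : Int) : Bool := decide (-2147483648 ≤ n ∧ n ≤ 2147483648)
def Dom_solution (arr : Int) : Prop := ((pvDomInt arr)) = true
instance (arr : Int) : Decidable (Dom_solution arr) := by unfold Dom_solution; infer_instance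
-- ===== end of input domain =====

-- B computes the digit sum arithmetically (n % 10 / n //= 10 loop) instead of summing int() of each character of str(arr); idiomatic, same cost.


-- ===== PORT A =====
-- Literal port of A: arr_sum accumulated over range(len(str(arr))), int(str_arr[i]) per index.
-- `.getD 0` only covers the none case (int('-') would raise ValueError); Pre_ excludes it.
def solution (arr : Int) : Bool :=
  let str_arr := PySem.Int.toStr arr
  let arr_sum := (PySem.List.pyRange 0 (PySem.Str.len str_arr) 1).foldl
    (fun s i => s + (((PySem.Str.pyGet? str_arr i).bind (fun c => PySem.Int.ofChars? [c])).getD 0)) 0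
  if PySem.Int.mod arr arr_sum ≠ 0 then false else true

-- ===== PORT B =====
-- while n > 0: total += n % 10; n //= 10
def solutionAltLoop (total : Int) (n : Int) : Int :=
  if h : 0 < n then
    solutionAltLoop (total + PySem.Int.mod n 10) (PySem.Int.floordiv n 10)
  else total
termination_by n.toNat
decreasing_by
  have h10 : PySem.Int.floordiv n 10 = n / 10 :=
    PySem.Int.floordiv_eq_ediv_of_pos (by omega)
  omega

def solution_alt (arr : Int) : Bool :=
  decide (PySem.Int.mod arr (solutionAltLoop 0 arr) = 0)

-- ===== PRECONDITION & SPEC =====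
-- Pre_ excludes exactly the inputs where A raises: arr = 0 (digit sum 0, ZeroDivisionError)
-- and arr < 0 (int('-') raises ValueError).
def Pre_solution (arr : Int) : Prop := 0 < arr
instance (arr : Int) : Decidable (Pre_solution arr) := by unfold Pre_solution; infer_instance
def pvWitness_solution : Int := 18

def Spec_solution (arr : Int) (out : Bool) : Prop := out = solution_alt arr
instance (arr : Int) (out : Bool) : Decidable (Spec_solution arr out) := by unfold Spec_solution; infer_instance

-- ===== CLAIM (what is proved, stated in full; the proofs are below) =====
def Claim_equal_solution : Prop := ∀ (arr : Int), Dom_solution arr → Pre_solution arr → Spec_solution arr (solution arr)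

-- ===== LEMMAS AND PROOFS =====

-- the per-character value A adds: int of the one-character string
def digitVal (c : Char) : Int := (PySem.Int.ofChars? [c]).getD 0

lemma toDigitsCore_eq (b : Nat) (hb : 2 ≤ b) :
    ∀ (n : Nat), 0 < n → ∀ (f : Nat) (ds : List Char), n < f →
      Nat.toDigitsCore b f n ds = ((Nat.digits b n).map Nat.digitChar).reverse ++ ds := by
  intro n
  induction n using Nat.strong_induction_on with
  | _ n ih =>
    intro hn f ds hf
    match f with
    | 0 => omega
    | f + 1 =>
      rw [Nat.toDigitsCore]
      by_cases h0 : n / b = 0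
      · have hnb : n < b := by
          have := Nat.div_eq_zero_iff.mp h0
          omega
        rw [if_pos h0, Nat.digits_def' hb hn, h0, Nat.digits_zero]
        simp [Nat.mod_eq_of_lt hnb]
      · rw [if_neg h0]
        have hlt : n / b < n := Nat.div_lt_self hn hb
        rw [ih (n / b) hlt (Nat.pos_of_ne_zero h0) f _ (lt_of_lt_of_le hlt (by omega))]
        rw [Nat.digits_def' hb hn]
        simp

lemma digitVal_digitChar (d : Nat) (hd : d < 10) : digitVal (Nat.digitChar d) = (d : Int) := by
  interval_cases d <;> decide

lemma foldl_add_digitVal (cs : List Char) (init : Int) :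
    cs.foldl (fun s c => s + digitVal c) init = init + (cs.map digitVal).sum := by
  induction cs generalizing init with
  | nil => simp
  | cons c cs ih => simp [ih, List.sum_cons]; ring

-- A's digit sum over str(arr) equals the sum of Nat.digits 10 arr.toNat, for arr > 0
lemma sumA_eq (arr : Int) (h : 0 < arr) :
    (PySem.List.pyRange 0 (PySem.Str.len (PySem.Int.toStr arr)) 1).foldl
      (fun s i => s + (((PySem.Str.pyGet? (PySem.Int.toStr arr) i).bind
        (fun c => PySem.Int.ofChars? [c])).getD 0)) 0
      = ((Nat.digits 10 arr.toNat).map Int.ofNat).sum := by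
  set str := PySem.Int.toStr arr with hstr
  set cs := str.toList with hcs
  -- rewrite the body into pyGetD form on in-range indices
  have hbody : (PySem.List.pyRange 0 (PySem.Str.len str) 1).foldl
      (fun s i => s + (((PySem.Str.pyGet? str i).bind (fun c => PySem.Int.ofChars? [c])).getD 0)) 0
      = (PySem.List.pyRange 0 (PySem.List.len cs) 1).foldl
      (fun s i => s + digitVal (PySem.List.pyGetD cs i '0')) 0 := by
    have hlen : PySem.Str.len str = PySem.List.len cs := by
      simp [PySem.Str.len_eq, PySem.List.len_eq, hcs]
    rw [hlen]
    apply PySem.List.foldl_congr_mem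
    intro s i hi
    have hmem := (PySem.List.mem_pyRange_one).mp hi
    simp only [PySem.List.len_eq] at hmem
    have h0 : 0 ≤ i := hmem.1
    have hilt : i < (cs.length : Int) := hmem.2
    have hget : PySem.Str.pyGet? str i = some (PySem.List.pyGetD cs i '0') := by
      show PySem.List.pyGet? cs i = _
      rw [PySem.List.pyGet?_of_nonneg cs h0,
        PySem.List.pyGetD_eq_getElem cs '0' h0 hilt]
      exact List.getElem?_eq_getElem (by omega)
    rw [hget]
    rfl
  rw [hbody, PySem.List.foldl_pyRange_zero_pyGetD cs '0' (fun s c => s + digitVal c) 0,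
    foldl_add_digitVal]
  -- cs = digits of arr rendered as chars
  have hchars : cs = ((Nat.digits 10 arr.toNat).map Nat.digitChar).reverse := by
    rw [hcs, hstr, PySem.Int.toList_toStr, PySem.Int.toChars, if_neg (by omega)]
    rw [Nat.toDigits, toDigitsCore_eq 10 (by omega) arr.toNat (by omega) _ [] (by omega)]
    simp
  rw [hchars, zero_add, List.map_reverse, List.sum_reverse, List.map_map]
  refine congrArg List.sum (List.map_congr_left ?_)
  intro d hd
  have hlt : d < 10 := Nat.digits_lt_base (by omega) hd
  simpa using digitVal_digitChar d hlt

-- B's loop computes total + sum of digits, for n > 0 (and is total for n ≤ 0)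
lemma altLoop_eq (n : Int) : ∀ total : Int,
    solutionAltLoop total n = total + ((Nat.digits 10 n.toNat).map Int.ofNat).sum := by
  induction n using (measure fun n : Int => n.toNat).wf.induction with
  | _ n ih =>
    intro total
    rw [solutionAltLoop]
    by_cases h : 0 < n
    · rw [dif_pos h]
      have hdiv : PySem.Int.floordiv n 10 = n / 10 :=
        PySem.Int.floordiv_eq_ediv_of_pos (by omega)
      have hmod : PySem.Int.mod n 10 = n % 10 :=
        PySem.Int.mod_eq_emod_of_pos (by omega)
      have hrec : (n / 10).toNat < n.toNat := by omega
      rw [hdiv, hmod, ih (n / 10) hrec]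
      have hdig : Nat.digits 10 n.toNat = n.toNat % 10 :: Nat.digits 10 (n.toNat / 10) :=
        Nat.digits_def' (by omega) (by omega)
      have h1 : ((n / 10).toNat) = n.toNat / 10 := by omega
      have h2 : (n % 10) = ((n.toNat % 10 : Nat) : Int) := by omega
      rw [h1, hdig, h2]
      simp; ring
    · rw [dif_neg h]
      have : n.toNat = 0 := by omega
      simp [this]

-- ===== VERDICT (by name: the statement is the Claim_ definition above) =====
theorem solution_spec : Claim_equal_solution := by
  intro arr _ hpre
  unfold Spec_solution solution solution_alt
  simp only []
  rw [sumA_eq arr hpre, altLoop_eq arr 0, zero_add]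
  by_cases h : PySem.Int.mod arr (((Nat.digits 10 arr.toNat).map Int.ofNat).sum) = 0 <;>
    simp [h]
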